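-- pv_equiv track=rewrite | github.com/AlbertKhomich/Advent-of-Code-2023 | 5.py | organize_input
-- ===== SOURCE A (Python) =====
-- def arr_to_int(array):
--     return list(map(lambda n: int(n), array))
--
-- def organize_input(array):
--     maps = []
--     buffer = []
--     for i in range(2, len(array)):
--         if array[i] == '':
--             maps.append(buffer)
--             buffer = []
--             continue
--         if array[i][0].isalpha():
--             continue
--         if array[i][0].isdigit():
--             buffer.append(arr_to_int(array[i].split()))
--     maps.append(buffer)
--     return maps
-- ===== SOURCE B (Python) =====
-- def arr_to_int(array):
--     return list(map(int, array))
--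
-- def blocks(lines):
--     if '' in lines:
--         i = lines.index('')
--         return [lines[:i]] + blocks(lines[i + 1:])
--     return [lines]
--
-- def organize_input(array):
--     return [[arr_to_int(l.split()) for l in b if l[0].isdigit()]
--             for b in blocks(array[2:])]
-- ===== Notes on version B (the rewrite author's own statement) =====
-- stated objective: alternative
-- what changed: Replaced A's flush-on-blank accumulator loop over indices with a two-stage pipeline: recursively split array[2:] into ''-separated blocks via list.index/slicing, then map a filter/parse comprehension over each block.
import Mathlib
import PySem

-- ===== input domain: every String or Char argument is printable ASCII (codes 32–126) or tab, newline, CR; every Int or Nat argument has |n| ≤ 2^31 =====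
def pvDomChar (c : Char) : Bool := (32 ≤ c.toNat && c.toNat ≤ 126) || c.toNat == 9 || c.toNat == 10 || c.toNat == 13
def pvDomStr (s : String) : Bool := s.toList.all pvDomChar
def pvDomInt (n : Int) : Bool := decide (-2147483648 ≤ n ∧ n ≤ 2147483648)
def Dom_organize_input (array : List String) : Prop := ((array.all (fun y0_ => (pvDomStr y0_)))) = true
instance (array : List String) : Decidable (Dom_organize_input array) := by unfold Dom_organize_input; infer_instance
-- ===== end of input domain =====

-- B replaces A's flush-on-blank accumulator loop with a recursive split of array[2:] into
-- ''-separated blocks followed by a per-block filter/parse comprehension (objective: alternative).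
-- On lines starting with a digit whose tokens are not valid int() literals both Pythons raise
-- ValueError; Pre_ excludes exactly those inputs.

-- ===== PORT A =====
-- shared helper arr_to_int (present identically in Source A and Source B); int() totalized with 0,
-- Pre_ guarantees every token actually parses
def arrToInt (ts : List String) : List Int :=
  ts.map (fun t => (PySem.Int.ofStr? t).getD 0)

-- one iteration of A's for-loop body on the state (maps, buffer) and the line array[i]
def stepA (st : List (List (List Int)) × List (List Int)) (s : String) :
    List (List (List Int)) × List (List Int) :=
  if s = "" then (st.1 ++ [st.2], [])
  else
    let c := (PySem.Str.pyGet? s 0).getD ' '   -- s ≠ "" here, so s[0] exists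
    if PySem.Chars.isalpha c then st
    else if PySem.Chars.isdigit c then (st.1, st.2 ++ [arrToInt (PySem.Str.split₀ s)])
    else st

def organize_input (array : List String) : List (List (List Int)) :=
  let st := (PySem.List.pyRange 2 (PySem.List.len array)).foldl
      (fun st i => stepA st (PySem.List.pyGetD array i "")) ([], [])
  st.1 ++ [st.2]

-- ===== PORT B =====
-- Source B's blocks: split at the first '' (list.index) and recurse on the rest;
-- lines[:i] / lines[i+1:] with i : Nat from index? are exactly take/drop
def blocksB (lines : List String) : List (List String) :=
  match h : PySem.List.index? lines "" with
  | none => [lines]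
  | some i => lines.take i :: blocksB (lines.drop (i + 1))
termination_by lines.length
decreasing_by
  obtain ⟨hk, -, -⟩ := PySem.List.getElem_of_index?_eq_some h
  simp only [List.length_drop]
  omega

-- the comprehension's guard l[0].isdigit(); none is unreachable (blocks contain no '' line)
def digitHead (l : String) : Bool :=
  match PySem.Str.pyGet? l 0 with
  | some c => PySem.Chars.isdigit c
  | none => false

def organize_input_alt (array : List String) : List (List (List Int)) :=
  (blocksB (PySem.List.slice array (some 2) none)).map
    (fun b => (b.filter digitHead).map (fun l => arrToInt (PySem.Str.split₀ l)))

-- ===== PRECONDITION & SPEC =====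
-- Pre_ excludes exactly the inputs on which Python A raises ValueError: a line after the first
-- two that starts with a digit but contains a token int() rejects (both Pythons raise there).
def Pre_organize_input (array : List String) : Prop :=
  ∀ s ∈ array.drop 2,
    (match PySem.Str.pyGet? s 0 with
     | some c => PySem.Chars.isdigit c
     | none => false) = true →
    ∀ t ∈ PySem.Str.split₀ s, (PySem.Int.ofStr? t).isSome
instance (array : List String) : Decidable (Pre_organize_input array) := by
  unfold Pre_organize_input; infer_instance

def pvWitness_organize_input : List String :=
  ["seeds: 79 14 55 13", "", "seed-to-soil map:", "50 98 2", "52 50 48", "", "soil map:", "0 15 37"]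

def Spec_organize_input (array : List String) (out : List (List (List Int))) : Prop :=
  out = organize_input_alt array
instance (array : List String) (out : List (List (List Int))) : Decidable (Spec_organize_input array out) := by
  unfold Spec_organize_input; infer_instance

-- ===== CLAIM (what is proved, stated in full; the proofs are below) =====
def Claim_equal_organize_input : Prop := ∀ (array : List String), Dom_organize_input array → Pre_organize_input array → Spec_organize_input array (organize_input array)

-- ===== LEMMAS AND PROOFS =====
theorem alpha_not_digit (c : Char) (h : PySem.Chars.isalpha c = true) :
    PySem.Chars.isdigit c = false := by
  simp only [PySem.Chars.isalpha, PySem.Chars.isupper, PySem.Chars.islower, PySem.Chars.isdigit,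
    Bool.or_eq_true, Bool.and_eq_true, decide_eq_true_eq] at *
  rcases h with ⟨h1, h2⟩ | ⟨h1, h2⟩ <;>
    · rw [Bool.and_eq_false_iff]
      right
      rw [decide_eq_false_iff_not]
      intro hle
      exact absurd (le_trans h1 hle) (by decide)

-- B's per-block transformation
def trB (b : List String) : List (List Int) :=
  (b.filter digitHead).map (fun l => arrToInt (PySem.Str.split₀ l))

-- prepend buf to the first block's result, transform the rest
def finishTr (buf : List (List Int)) : List (List String) → List (List (List Int))
  | [] => [buf]
  | b :: bs => (buf ++ trB b) :: bs.map trB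

theorem blocksB_ne_nil (lines : List String) : blocksB lines ≠ [] := by
  rw [blocksB.eq_def]
  split <;> simp

theorem blocksB_nil : blocksB [] = [[]] := by
  rw [blocksB.eq_def]
  simp [PySem.List.index?_eq_idxOf?]

theorem blocksB_cons_sep (rest : List String) : blocksB ("" :: rest) = [] :: blocksB rest := by
  rw [blocksB.eq_def]
  split
  · rename_i h
    rw [PySem.List.index?_cons_self] at h
    cases h
  · rename_i i h
    rw [PySem.List.index?_cons_self] at h
    injection h with h
    subst h
    simp

theorem blocksB_cons_ne {s : String} (hs : s ≠ "") (rest : List String) :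
    blocksB (s :: rest) = (blocksB rest).modifyHead (s :: ·) := by
  rw [blocksB.eq_def]
  split
  · rename_i h
    rw [PySem.List.index?_cons_of_ne rest hs, Option.map_eq_none_iff] at h
    rw [blocksB.eq_def (lines := rest), h]
    simp
  · rename_i i h
    rw [PySem.List.index?_cons_of_ne rest hs] at h
    cases hr : PySem.List.index? rest "" with
    | none => rw [hr] at h; cases h
    | some j =>
        rw [hr] at h
        injection h with h
        subst h
        rw [blocksB.eq_def (lines := rest), hr]
        simp

theorem stepA_sep (maps : List (List (List Int))) (buf : List (List Int)) :
    stepA (maps, buf) "" = (maps ++ [buf], []) := by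
  simp [stepA]

theorem digitHead_eq (l : String) :
    digitHead l = PySem.Chars.isdigit ((PySem.Str.pyGet? l 0).getD ' ') := by
  unfold digitHead
  cases PySem.Str.pyGet? l 0
  · decide
  · rfl

theorem stepA_ne {s : String} (hs : s ≠ "") (maps : List (List (List Int))) (buf : List (List Int)) :
    stepA (maps, buf) s
      = (maps, buf ++ (if digitHead s then [arrToInt (PySem.Str.split₀ s)] else [])) := by
  simp only [stepA, hs, if_false, digitHead_eq, PySem.Str.pyGet?_eq,
    PySem.Chars.pyGet?_eq_listPyGet?]
  by_cases ha : PySem.Chars.isalpha ((PySem.List.pyGet? s.toList 0).getD ' ')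
  · simp [ha, alpha_not_digit _ ha]
  · by_cases hd : PySem.Chars.isdigit ((PySem.List.pyGet? s.toList 0).getD ' ') <;> simp [ha, hd]

theorem foldl_stepA (L : List String) : ∀ (maps : List (List (List Int))) (buf : List (List Int)),
    (L.foldl stepA (maps, buf)).1 ++ [(L.foldl stepA (maps, buf)).2]
      = maps ++ finishTr buf (blocksB L) := by
  induction L with
  | nil => intro maps buf; simp [blocksB_nil, finishTr, trB]
  | cons s rest ih =>
    intro maps buf
    by_cases hs : s = ""
    · subst hs
      rw [List.foldl_cons, stepA_sep, ih, blocksB_cons_sep]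
      obtain ⟨b, bs, hb⟩ := List.exists_cons_of_ne_nil (blocksB_ne_nil rest)
      simp [hb, finishTr, trB]
    · rw [List.foldl_cons, stepA_ne hs, ih, blocksB_cons_ne hs]
      obtain ⟨b, bs, hb⟩ := List.exists_cons_of_ne_nil (blocksB_ne_nil rest)
      by_cases hd : digitHead s <;>
        simp [hb, finishTr, trB, hd]

-- ===== VERDICT (by name: the statement is the Claim_ definition above) =====
theorem organize_input_spec : Claim_equal_organize_input := by
  intro array _ _
  unfold Spec_organize_input organize_input organize_input_alt
  rw [PySem.List.foldl_pyRange_pyGetD array "" stepA ([], []) (by norm_num)]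
  rw [PySem.List.slice_from array (by norm_num)]
  have h2 : ((2 : Int)).toNat = 2 := rfl
  rw [h2, foldl_stepA]
  obtain ⟨b, bs, hb⟩ := List.exists_cons_of_ne_nil (blocksB_ne_nil (array.drop 2))
  simp [hb, finishTr, trB]
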